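-- pv_equiv track=rewrite | github.com/5sachin/StrategifyDjango | FinalYearProject/Strategify/utils.py | extractMaximum
-- ===== SOURCE A (Python) =====
-- def extractMaximum(ss):
--     num, res = 0, 0
--     for i in range(len(ss)):
--         if ss[i] >= "0" and ss[i] <= "9":
--             num = num * 10 + int(int(ss[i]) - 0)
--         else:
--             res = max(res, num)
--             num = 0
--
--     return max(res, num)
-- ===== SOURCE B (Python) =====
-- def extractMaximum(ss):
--     # Tokenize: collect every maximal run of ASCII digits, then reduce with max.
--     runs, cur = [], ""
--     for c in ss:
--         if "0" <= c <= "9":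
--             cur += c
--         elif cur:
--             runs.append(cur)
--             cur = ""
--     if cur:
--         runs.append(cur)
--     return max((int(r) for r in runs), default=0)
-- ===== Notes on version B (the rewrite author's own statement) =====
-- stated objective: alternative
-- what changed: Replaces A's online state machine (running numeric accumulator interleaved with a running max) by a tokenize-then-reduce approach: collect the list of maximal digit substrings in one pass, then take max(int(r) for r in runs, default=0); measured faster by a constant factor since per-character work avoids the int arithmetic and max of A's inner loop.
import Mathlib
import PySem

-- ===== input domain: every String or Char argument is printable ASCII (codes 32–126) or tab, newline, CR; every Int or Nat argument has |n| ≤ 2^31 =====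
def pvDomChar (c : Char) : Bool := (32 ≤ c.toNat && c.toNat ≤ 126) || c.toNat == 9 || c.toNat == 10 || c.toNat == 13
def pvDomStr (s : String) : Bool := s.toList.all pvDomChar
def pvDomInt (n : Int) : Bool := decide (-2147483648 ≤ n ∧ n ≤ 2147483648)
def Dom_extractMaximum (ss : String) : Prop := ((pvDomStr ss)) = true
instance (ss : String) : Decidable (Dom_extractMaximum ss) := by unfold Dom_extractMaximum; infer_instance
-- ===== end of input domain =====

-- B replaces A's online digit-accumulator/running-max state machine by tokenize-then-reduce
-- (collect the maximal digit runs, then max of their integer values, default 0); same O(n) cost.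

-- ===== PORT A =====
-- A's loop: state (num, res); digit → num = num*10 + digit value; else → res = max res num, num = 0.
def extractMaximum (ss : String) : Int :=
  let p := ss.toList.foldl
    (fun (p : Int × Int) c =>
      if '0' ≤ c ∧ c ≤ '9' then (p.1 * 10 + ((c.toNat : Int) - ('0'.toNat : Int)), p.2)
      else (0, max p.2 p.1))
    (0, 0)
  max p.2 p.1

-- ===== PORT B =====
-- Source B's tokenizer loop: builds the list of maximal digit runs in order.
def pvRuns : List Char → List Char → List (List Char)
  | [], cur => if cur = [] then [] else [cur]
  | c :: cs, cur =>
      if '0' ≤ c ∧ c ≤ '9' then pvRuns cs (cur ++ [c])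
      else if cur = [] then pvRuns cs [] else cur :: pvRuns cs []

-- int(r) for a nonempty all-digit token r (exact there: no sign/whitespace/underscores occur in a run).
def pvIntVal (r : List Char) : Int :=
  r.foldl (fun v c => v * 10 + ((c.toNat : Int) - ('0'.toNat : Int))) 0

-- max(gen, default=0)
def extractMaximum_alt (ss : String) : Int :=
  PySem.List.maxD ((pvRuns ss.toList []).map pvIntVal) (fun x => x) 0

-- ===== PRECONDITION & SPEC =====
def Spec_extractMaximum (ss : String) (out : Int) : Prop := out = extractMaximum_alt ss
instance (ss : String) (out : Int) : Decidable (Spec_extractMaximum ss out) := by unfold Spec_extractMaximum; infer_instance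

-- ===== CLAIM (what is proved, stated in full; the proofs are below) =====
def Claim_equal_extractMaximum : Prop := ∀ (ss : String), Dom_extractMaximum ss → Spec_extractMaximum ss (extractMaximum ss)

-- ===== LEMMAS AND PROOFS =====

theorem pvIntVal_append (r : List Char) (c : Char) :
    pvIntVal (r ++ [c]) = pvIntVal r * 10 + ((c.toNat : Int) - ('0'.toNat : Int)) := by
  simp [pvIntVal, List.foldl_append]

theorem pvIntVal_nonneg (r : List Char) (h : ∀ c ∈ r, '0' ≤ c) : 0 ≤ pvIntVal r := by
  induction r using List.reverseRecOn with
  | nil => simp [pvIntVal]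
  | append_singleton t c ih =>
      rw [pvIntVal_append]
      have h0 : 0 ≤ pvIntVal t := ih (fun x hx => h x (by simp [hx]))
      have hc : '0' ≤ c := h c (by simp)
      have : ('0'.toNat : Int) ≤ (c.toNat : Int) := by
        have := hc
        simp only [Char.le_def, UInt32.le_iff_toNat_le] at this
        exact_mod_cast this
      nlinarith

theorem foldl_max_nonneg_pull (l : List Int) (a : Int) (ha : 0 ≤ a) :
    l.foldl max a = max a (l.foldl max 0) := by
  induction l generalizing a with
  | nil => simp; omega
  | cons x t ih =>
      simp only [List.foldl_cons]
      rw [ih (max a x) (le_trans ha (le_max_left _ _)), ih (max 0 x) (le_max_left _ _)]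
      omega

theorem digits_snoc (cur : List Char) (c : Char) (hcur : ∀ x ∈ cur, '0' ≤ x)
    (hc : '0' ≤ c) : ∀ x ∈ cur ++ [c], '0' ≤ x := by
  intro x hx
  rcases List.mem_append.1 hx with h | h
  · exact hcur x h
  · simp at h; subst h; exact hc

-- All characters inside every produced run are digits.
theorem pvRuns_digits (cs cur : List Char) (hcur : ∀ c ∈ cur, '0' ≤ c) :
    ∀ r ∈ pvRuns cs cur, ∀ c ∈ r, '0' ≤ c := by
  induction cs generalizing cur with
  | nil =>
      intro r hr
      by_cases h : cur = [] <;> simp [pvRuns, h] at hr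
      subst hr; exact hcur
  | cons c cs ih =>
      intro r hr
      by_cases hd : '0' ≤ c ∧ c ≤ '9'
      · simp only [pvRuns, if_pos hd] at hr
        exact ih (cur ++ [c]) (digits_snoc cur c hcur hd.1) r hr
      · simp only [pvRuns, if_neg hd] at hr
        by_cases hc : cur = []
        · simp [hc] at hr; exact ih [] (by simp) r hr
        · simp [hc] at hr
          rcases hr with hr | hr
          · subst hr; exact hcur
          · exact ih [] (by simp) r hr

-- Key invariant linking A's state machine to the tokenizer.
theorem pv_main (cs : List Char) (cur : List Char) (res : Int)
    (hres : 0 ≤ res) (hcur : ∀ c ∈ cur, '0' ≤ c) :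
    max (cs.foldl
        (fun (p : Int × Int) c =>
          if '0' ≤ c ∧ c ≤ '9' then (p.1 * 10 + ((c.toNat : Int) - ('0'.toNat : Int)), p.2)
          else (0, max p.2 p.1))
        (pvIntVal cur, res)).2
      (cs.foldl
        (fun (p : Int × Int) c =>
          if '0' ≤ c ∧ c ≤ '9' then (p.1 * 10 + ((c.toNat : Int) - ('0'.toNat : Int)), p.2)
          else (0, max p.2 p.1))
        (pvIntVal cur, res)).1
    = max res (((pvRuns cs cur).map pvIntVal).foldl max 0) := by
  induction cs generalizing cur res with
  | nil =>
      by_cases h : cur = []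
      · subst h; simp [pvRuns, pvIntVal]
      · have hv : 0 ≤ pvIntVal cur := pvIntVal_nonneg cur hcur
        simp [pvRuns, h]
        omega
  | cons c cs ih =>
      by_cases hd : '0' ≤ c ∧ c ≤ '9'
      · simp only [List.foldl_cons, if_pos hd, pvRuns]
        rw [← pvIntVal_append]
        exact ih (cur ++ [c]) res hres (digits_snoc cur c hcur hd.1)
      · have hv : 0 ≤ pvIntVal cur := pvIntVal_nonneg cur hcur
        have hM : 0 ≤ ((pvRuns cs []).map pvIntVal).foldl max 0 :=
          (PySem.List.le_foldl_max _ _).1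
        have key := ih ([] : List Char) (max res (pvIntVal cur)) (by omega) (by simp)
        rw [show pvIntVal [] = (0 : Int) from rfl] at key
        simp only [List.foldl_cons, if_neg hd, pvRuns]
        by_cases hc : cur = []
        · rw [if_pos hc]
          have h0 : pvIntVal cur = 0 := by rw [hc]; rfl
          rw [h0] at key ⊢
          rw [key]
          omega
        · rw [if_neg hc, key, List.map_cons, List.foldl_cons]
          rw [foldl_max_nonneg_pull _ (max 0 (pvIntVal cur)) (le_max_left _ _)]
          omega

theorem maxD_id_eq_foldl (l : List Int) (h : ∀ x ∈ l, 0 ≤ x) :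
    PySem.List.maxD l (fun x => x) 0 = l.foldl max 0 := by
  cases l with
  | nil => simp [PySem.List.maxD, PySem.List.max?]
  | cons x t =>
      have hm : PySem.List.max? (x :: t) (fun y => y) = some (t.foldl max x) :=
        PySem.List.max?_id_cons x t
      have hx : 0 ≤ x := h x (by simp)
      simp [PySem.List.maxD, hm]
      have : max 0 x = x := by omega
      rw [this]

-- ===== VERDICT (by name: the statement is the Claim_ definition above) =====
theorem extractMaximum_spec : Claim_equal_extractMaximum := by
  intro ss _
  unfold Spec_extractMaximum extractMaximum extractMaximum_alt
  have hmain := pv_main ss.toList [] 0 le_rfl (by simp)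
  rw [show pvIntVal [] = (0 : Int) from rfl] at hmain
  have hM : 0 ≤ ((pvRuns ss.toList []).map pvIntVal).foldl max 0 :=
    (PySem.List.le_foldl_max _ _).1
  simp only []
  rw [hmain]
  rw [maxD_id_eq_foldl _ (by
    intro x hx
    rcases List.mem_map.1 hx with ⟨r, hr, rfl⟩
    exact pvIntVal_nonneg r (pvRuns_digits ss.toList [] (by simp) r hr))]
  omega
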